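-- pv_equiv track=rewrite | github.com/Buckinghamshire-Digital-Service/buckinghamshire-council | bc/utils/blocks.py | clean_table_values
-- ===== SOURCE A (Python) =====
-- import copy
--
-- def clean_table_values(table):
--     """
--     Remove empty rows and columns
--     """
--
--     cleaned_table = copy.deepcopy(table)
--
--     # Remove empty rows
--     for row in table:
--         if all([cell is None or not cell.strip() for cell in row]):
--             cleaned_table.remove(row)
--
--     # Remove empty columns
--     transposed_table = [*zip(*cleaned_table)]
--     removed_count = 0
--     for index, col in enumerate(transposed_table):
--         if all([cell is None or not cell.strip() for cell in col]):
--             for row in cleaned_table: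
--                 del row[index - removed_count]
--             removed_count += 1
--
--     return cleaned_table
-- ===== SOURCE B (Python) =====
-- def clean_table_values(table):
--     """
--     Remove empty rows and columns
--     """
--
--     def _empty(cell):
--         return cell is None or not cell.strip()
--
--     rows = [row for row in table if not all(_empty(cell) for cell in row)]
--     if not rows:
--         return []
--     m = min(len(row) for row in rows)
--     dead = {j for j in range(m) if all(_empty(row[j]) for row in rows)}
--     return [[cell for j, cell in enumerate(row) if j not in dead] for row in rows]
-- ===== Notes on version B (the rewrite author's own statement) =====
-- stated objective: faster
-- what changed: Instead of deleting empty rows with list.remove and deleting empty columns in place with repeated del (shifting every row each time), B filters rows in one pass, marks the empty column indices in one set-building scan, and rebuilds each row by index in a single pass.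
import Mathlib
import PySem

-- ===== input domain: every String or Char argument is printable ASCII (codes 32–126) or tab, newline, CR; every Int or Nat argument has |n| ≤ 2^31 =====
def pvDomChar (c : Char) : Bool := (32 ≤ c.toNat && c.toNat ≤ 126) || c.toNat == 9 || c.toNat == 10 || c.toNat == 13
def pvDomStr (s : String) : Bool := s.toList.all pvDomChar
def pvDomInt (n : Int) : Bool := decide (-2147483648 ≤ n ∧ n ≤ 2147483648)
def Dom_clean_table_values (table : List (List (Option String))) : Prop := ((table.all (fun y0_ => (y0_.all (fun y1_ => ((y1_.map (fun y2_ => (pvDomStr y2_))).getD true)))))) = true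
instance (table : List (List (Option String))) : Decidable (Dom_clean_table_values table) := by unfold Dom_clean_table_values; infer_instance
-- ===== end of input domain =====

-- B removes empty rows by a single filter, marks empty column indices once, and rebuilds
-- rows by index in one pass, instead of A's repeated list.remove / in-place column deletion.
-- Return values are equal on every input (proved below); neither side mutates the argument.

-- ===== PORT A =====

-- cell is None or not cell.strip()
def pvCellEmptyA (c : Option String) : Bool :=
  match c with
  | none => true
  | some s => PySem.Str.strip s == ""

-- all([cell is None or not cell.strip() for cell in row])
def pvRowEmptyA (row : List (Option String)) : Bool := row.all pvCellEmptyA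

-- the "Remove empty rows" loop: cleaned starts as a copy of table; cleaned.remove(row)
-- removes the first equal row (PySem.List.remove?); it never fails here, so .getD is inert.
def pvRemoveRowsA (table : List (List (Option String))) : List (List (Option String)) :=
  table.foldl
    (fun cleaned row =>
      if pvRowEmptyA row then (PySem.List.remove? cleaned row).getD cleaned else cleaned)
    table

-- termination helpers for pvZip (cited by name in decreasing_by)
theorem pvTails_sum_le (l : List (List (Option String))) :
    ((l.map List.tail).map List.length).sum ≤ (l.map List.length).sum := by
  induction l with
  | nil => simp
  | cons x xs ih =>
    simp only [List.map_cons, List.sum_cons]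
    have : x.tail.length ≤ x.length := by cases x <;> simp
    omega

theorem pvZip_dec (ls : List (List (Option String))) (h0 : ls = [] → False)
    (h1 : ls.any (fun r => r.isEmpty) = false) :
    ((ls.map List.tail).map List.length).sum < (ls.map List.length).sum := by
  cases ls with
  | nil => exact absurd rfl h0
  | cons r rs =>
    simp only [List.any_cons, Bool.or_eq_false_iff] at h1
    have hr : r ≠ [] := by
      cases r with
      | nil => simp at h1
      | cons a b => simp
    have hle := pvTails_sum_le rs
    have hlt : r.tail.length < r.length := by
      cases r with
      | nil => exact absurd rfl hr
      | cons a b => simp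
    simp only [List.map_cons, List.sum_cons]
    omega

-- [*zip(*cleaned)] : columns up to the shortest row (zip of no iterables is empty)
def pvZip (ls : List (List (Option String))) : List (List (Option String)) :=
  if h : ls = [] ∨ ls.any (fun r => r.isEmpty) = true then []
  else (ls.map (fun r => r.headD none)) :: pvZip (ls.map List.tail)
termination_by (ls.map List.length).sum
decreasing_by
  simpa using pvZip_dec ls (fun he => (not_or.mp h).1 he)
    (by cases hx : ls.any (fun r => r.isEmpty) <;> simp_all)

-- one step of the "Remove empty columns" loop: state = (cleaned, removed_count),
-- input = (col, index) from enumerate(transposed); del row[index - removed_count]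
def pvColStep (st : List (List (Option String)) × Nat) (p : List (Option String) × Nat) :
    List (List (Option String)) × Nat :=
  if p.1.all pvCellEmptyA then
    (st.1.map (fun row => row.eraseIdx (p.2 - st.2)), st.2 + 1)
  else st

def clean_table_values (table : List (List (Option String))) : List (List (Option String)) :=
  let cleaned := pvRemoveRowsA table
  let transposed := pvZip cleaned
  ((transposed.zipIdx 0).foldl pvColStep (cleaned, 0)).1

-- ===== PORT B =====

def pvCellEmptyB (c : Option String) : Bool :=
  match c with
  | none => true
  | some s => PySem.Str.strip s == ""

-- min(len(row) for row in rows) (rows nonempty where it is used)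
def pvMinLen (rows : List (List (Option String))) : Nat :=
  match rows with
  | [] => 0
  | r :: rs => rs.foldl (fun a x => min a x.length) r.length

-- [cell for j, cell in enumerate(row) if j not in dead]
def pvKeepRow (dead : List Nat) (row : List (Option String)) : List (Option String) :=
  ((row.zipIdx 0).filter (fun p => !(dead.contains p.2))).map Prod.fst

def clean_table_values_alt (table : List (List (Option String))) :
    List (List (Option String)) :=
  let rows := table.filter (fun row => !(row.all pvCellEmptyB))
  if rows = [] then []
  else
    let m := pvMinLen rows
    -- {j for j in range(m) if all(_empty(row[j]) for row in rows)} : a set of distinct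
    -- indices, represented by its (distinct, increasing) list; row[j] is in range (j < m).
    let dead := (List.range m).filter (fun j => rows.all (fun r => pvCellEmptyB (r.getD j none)))
    rows.map (pvKeepRow dead)

-- ===== PRECONDITION & SPEC =====
def Spec_clean_table_values (table : List (List (Option String))) (out : List (List (Option String))) : Prop := out = clean_table_values_alt table
instance (table : List (List (Option String))) (out : List (List (Option String))) : Decidable (Spec_clean_table_values table out) := by unfold Spec_clean_table_values; infer_instance

-- ===== CLAIM (what is proved, stated in full; the proofs are below) =====
def Claim_equal_clean_table_values : Prop := ∀ (table : List (List (Option String))), Dom_clean_table_values table → Spec_clean_table_values table (clean_table_values table)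

-- ===== LEMMAS AND PROOFS =====

theorem pvCellEmpty_eq : pvCellEmptyA = pvCellEmptyB := rfl

-- ---- row removal = filter ----

theorem pvRemove_append (pre rest : List (List (Option String))) (row : List (Option String))
    (hpre : ∀ r ∈ pre, pvRowEmptyA r = false) (hrow : pvRowEmptyA row = true) :
    PySem.List.remove? (pre ++ row :: rest) row = some (pre ++ rest) := by
  induction pre with
  | nil => simp [PySem.List.remove?_cons_self]
  | cons x xs ih =>
    have hx : x ≠ row := by
      intro he; subst he
      have := hpre x (by simp)
      rw [this] at hrow; exact Bool.false_ne_true hrow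
    rw [List.cons_append, PySem.List.remove?_cons_of_ne _ hx,
      ih (fun r hr => hpre r (List.mem_cons_of_mem _ hr))]
    rfl

theorem pvRowLoop (rows pre : List (List (Option String)))
    (hpre : ∀ r ∈ pre, pvRowEmptyA r = false) :
    rows.foldl
      (fun cleaned row =>
        if pvRowEmptyA row then (PySem.List.remove? cleaned row).getD cleaned else cleaned)
      (pre ++ rows)
      = pre ++ rows.filter (fun r => !(pvRowEmptyA r)) := by
  induction rows generalizing pre with
  | nil => simp
  | cons row rest ih =>
    simp only [List.foldl_cons]
    cases hrow : pvRowEmptyA row with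
    | true =>
      rw [if_pos rfl, pvRemove_append pre rest row hpre hrow]
      simpa [List.filter_cons, hrow] using ih pre hpre
    | false =>
      rw [if_neg (by simp [hrow])]
      have := ih (pre ++ [row]) (by
        intro r hr
        rcases List.mem_append.mp hr with h | h
        · exact hpre r h
        · simp only [List.mem_singleton] at h; subst h; exact hrow)
      simpa [List.filter_cons, hrow, List.append_assoc] using this

theorem pvRemoveRowsA_eq (table : List (List (Option String))) :
    pvRemoveRowsA table = table.filter (fun r => !(pvRowEmptyA r)) := by
  simpa using pvRowLoop table [] (by intro r hr; simp at hr)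

-- ---- per-row: sequence of eraseIdx (with shifting offsets) = keep-by-index ----

-- the per-row effect of A's column loop: erase adjusted indices in order
def pvGo (k : Nat) (D : List Nat) (row : List (Option String)) : List (Option String) :=
  match D with
  | [] => row
  | j :: rest => pvGo (k + 1) rest (row.eraseIdx (j - k))

-- recursive form of pvKeepRow
def pvKeepFrom (dead : List Nat) (i : Nat) (row : List (Option String)) :
    List (Option String) :=
  match row with
  | [] => []
  | c :: cs => if dead.contains i then pvKeepFrom dead (i + 1) cs
               else c :: pvKeepFrom dead (i + 1) cs

theorem pvKeepRow_eq_from (dead : List Nat) (row : List (Option String)) (i : Nat) :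
    ((row.zipIdx i).filter (fun p => !(dead.contains p.2))).map Prod.fst
      = pvKeepFrom dead i row := by
  induction row generalizing i with
  | nil => rfl
  | cons c cs ih =>
    simp only [List.zipIdx_cons, List.filter_cons, pvKeepFrom]
    by_cases h : i ∈ dead
    · have hc : dead.contains i = true := by simpa using h
      simp only [hc, Bool.not_true, Bool.false_eq_true, if_false, if_true]
      exact ih (i + 1)
    · have hc : dead.contains i = false := by simpa using h
      simp only [hc, Bool.not_false, if_true, Bool.false_eq_true, if_false, List.map_cons]
      rw [ih (i + 1)]

theorem pvKeepFrom_nil (i : Nat) (row : List (Option String)) :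
    pvKeepFrom [] i row = row := by
  induction row generalizing i with
  | nil => rfl
  | cons c cs ih => simp [pvKeepFrom, ih]

theorem pvKeepFrom_cons_lt (j : Nat) (rest : List Nat) (i : Nat) (row : List (Option String))
    (h : j < i) : pvKeepFrom (j :: rest) i row = pvKeepFrom rest i row := by
  induction row generalizing i with
  | nil => rfl
  | cons c cs ih =>
    have hne : i ≠ j := by omega
    simp only [pvKeepFrom]
    have hc : ((j :: rest).contains i) = (rest.contains i) := by
      simp [List.mem_cons, hne]
    rw [hc, ih (i + 1) (by omega)]

theorem pvBridge (row : List (Option String)) (j k : Nat) (rest : List Nat)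
    (hkj : k ≤ j) (hrest : ∀ x ∈ rest, j < x) :
    pvKeepFrom rest (k + 1) (row.eraseIdx (j - k)) = pvKeepFrom (j :: rest) k row := by
  induction row generalizing j k with
  | nil => simp [List.eraseIdx, pvKeepFrom]
  | cons c cs ih =>
    by_cases hje : k = j
    · subst hje
      have h0 : k - k = 0 := by omega
      rw [h0, List.eraseIdx_cons_zero]
      have hk : k ∈ k :: rest := by simp
      simp only [pvKeepFrom]
      rw [if_pos (by simpa using List.contains_iff_mem.mpr hk)]
      exact (pvKeepFrom_cons_lt k rest (k + 1) cs (by omega)).symm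
    · have hklt : k < j := lt_of_le_of_ne hkj hje
      have hsub : j - k = (j - (k + 1)) + 1 := by omega
      rw [hsub, List.eraseIdx_cons_succ]
      have h1 : (k + 1) ∉ rest := fun hm => by have := hrest _ hm; omega
      have h2 : k ∉ (j :: rest) := by
        intro hm
        rcases List.mem_cons.mp hm with h | h
        · omega
        · have := hrest _ h; omega
      simp only [pvKeepFrom]
      rw [if_neg (by simpa using h1), if_neg (by simpa using h2)]
      rw [ih j (k + 1) (by omega) hrest]

theorem pvCore (D : List Nat) (k : Nat) (row : List (Option String))
    (hge : ∀ x ∈ D, k ≤ x) (hp : D.Pairwise (· < ·)) :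
    pvGo k D row = pvKeepFrom D k row := by
  induction D generalizing k row with
  | nil => simp [pvGo, pvKeepFrom_nil]
  | cons j rest ih =>
    have hkj : k ≤ j := hge j (by simp)
    have hrest : ∀ x ∈ rest, j < x := fun x hx => (List.pairwise_cons.mp hp).1 x hx
    rw [pvGo, ih (k + 1) _ (fun x hx => by have := hrest x hx; omega)
      (List.pairwise_cons.mp hp).2]
    exact pvBridge row j k rest hkj hrest

-- ---- A's column fold, reduced to pvGo over the dead-index list ----

def pvDeadOf (cols : List (List (Option String))) (k : Nat) : List Nat :=
  ((cols.zipIdx k).filter (fun p => p.1.all pvCellEmptyA)).map Prod.snd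

theorem pvGo_nil_map (r : Nat) (cur : List (List (Option String))) :
    cur.map (pvGo r []) = cur := by
  rw [List.map_congr_left (fun row _ => by rw [pvGo])]
  exact List.map_id cur

theorem pvColFold (cols : List (List (Option String))) (k r : Nat)
    (cur : List (List (Option String))) :
    (cols.zipIdx k).foldl pvColStep (cur, r)
      = (cur.map (pvGo r (pvDeadOf cols k)), r + (pvDeadOf cols k).length) := by
  induction cols generalizing k r cur with
  | nil =>
    simp only [List.zipIdx_nil, List.foldl_nil, pvDeadOf, List.filter_nil, List.map_nil,
      List.length_nil, Nat.add_zero]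
    rw [pvGo_nil_map]
  | cons c cs ih =>
    simp only [List.zipIdx_cons, List.foldl_cons, pvDeadOf, List.filter_cons]
    cases hc : c.all pvCellEmptyA with
    | true =>
      simp only [pvColStep, hc, if_true]
      rw [ih (k + 1) (r + 1)]
      simp only [List.map_cons, List.map_map, List.length_cons, Prod.mk.injEq, pvDeadOf]
      refine ⟨?_, by omega⟩
      apply List.map_congr_left
      intro row _
      rfl
    | false =>
      simp only [pvColStep, hc, Bool.false_eq_true, if_false]
      rw [ih (k + 1) r]
      rfl

-- ---- pvZip as an indexed map ----

theorem pvMinLen_foldl_sub (l : List Nat) (a : Nat) :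
    l.foldl (fun b x => min b (x - 1)) (a - 1) = l.foldl min a - 1 := by
  induction l generalizing a with
  | nil => rfl
  | cons x xs ih =>
    simp only [List.foldl_cons]
    rw [show min (a - 1) (x - 1) = min a x - 1 by omega, ih]

theorem pvMinLen_tails (rows : List (List (Option String))) :
    pvMinLen (rows.map List.tail) = pvMinLen rows - 1 := by
  cases rows with
  | nil => rfl
  | cons r rs =>
    have htl : ∀ (x : List (Option String)), x.tail.length = x.length - 1 := by
      intro x; cases x <;> simp
    have h1 : (rs.map List.tail).foldl (fun a x => min a x.length) r.tail.length
        = rs.foldl (fun a x => min a (x.length - 1)) (r.length - 1) := by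
      rw [List.foldl_map, htl r]
      congr 1
      funext a x
      rw [htl x]
    have h2 : rs.foldl (fun a x => min a (x.length - 1)) (r.length - 1)
        = (rs.map List.length).foldl (fun b x => min b (x - 1)) (r.length - 1) := by
      rw [List.foldl_map]
    have h4 : (rs.map List.length).foldl min r.length
        = rs.foldl (fun a x => min a x.length) r.length := by
      rw [List.foldl_map]
    simp only [List.map_cons, pvMinLen]
    rw [h1, h2, pvMinLen_foldl_sub (rs.map List.length) r.length, h4]

theorem pvMinLen_le (rows : List (List (Option String))) (r : List (Option String))
    (hr : r ∈ rows) : pvMinLen rows ≤ r.length := by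
  cases rows with
  | nil => simp at hr
  | cons x xs =>
    simp only [pvMinLen]
    have key : ∀ (l : List (List (Option String))) (a : Nat),
        l.foldl (fun b y => min b y.length) a ≤ a ∧
        ∀ y ∈ l, l.foldl (fun b y => min b y.length) a ≤ y.length := by
      intro l
      induction l with
      | nil => intro a; exact ⟨le_refl a, by intro y hy; simp at hy⟩
      | cons z zs ih =>
        intro a
        rcases ih (min a z.length) with ⟨h1, h2⟩
        refine ⟨le_trans h1 (by omega), ?_⟩
        intro y hy
        rcases List.mem_cons.mp hy with h | h
        · subst h; exact le_trans h1 (by omega)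
        · exact h2 y h
    rcases List.mem_cons.mp hr with h | h
    · subst h; exact (key xs r.length).1
    · exact (key xs x.length).2 r h

theorem pvMinLen_pos (rows : List (List (Option String))) (hne : rows ≠ [])
    (hall : rows.any (fun r => r.isEmpty) = false) : 1 ≤ pvMinLen rows := by
  cases rows with
  | nil => exact absurd rfl hne
  | cons r rs =>
    simp only [List.any_cons, Bool.or_eq_false_iff] at hall
    simp only [pvMinLen]
    have key : ∀ (l : List (List (Option String))) (a : Nat), 1 ≤ a →
        (∀ y ∈ l, y.isEmpty = false) → 1 ≤ l.foldl (fun b y => min b y.length) a := by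
      intro l
      induction l with
      | nil => intro a ha _; exact ha
      | cons z zs ih =>
        intro a ha hz
        have hzlen : 1 ≤ z.length := by
          have := hz z (by simp); cases z <;> simp_all
        exact ih (min a z.length) (by omega) (fun y hy => hz y (List.mem_cons_of_mem _ hy))
    have hrlen : 1 ≤ r.length := by
      rcases hall with ⟨h1, _⟩
      cases r <;> simp_all
    apply key rs r.length hrlen
    intro y hy
    rcases hall with ⟨_, h2⟩
    simpa using List.any_eq_false.mp h2 y hy

def pvColFn (rows : List (List (Option String))) (j : Nat) : List (Option String) :=
  rows.map (fun r => r.getD j none)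

theorem pvZip_eq (rows : List (List (Option String))) :
    pvZip rows = (List.range (pvMinLen rows)).map (pvColFn rows) := by
  by_cases h : rows = [] ∨ rows.any (fun r => r.isEmpty) = true
  · rw [pvZip, dif_pos h]
    rcases h with h | h
    · subst h; rfl
    · rcases List.any_eq_true.mp h with ⟨r, hr, hre⟩
      have h0 : pvMinLen rows = 0 := by
        have h1 := pvMinLen_le rows r hr
        have : r.length = 0 := by cases r <;> simp_all
        omega
      rw [h0]; rfl
  · rw [pvZip, dif_neg h]
    obtain ⟨hne', hany⟩ := not_or.mp h
    have hne : rows ≠ [] := hne'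
    have hany' : rows.any (fun r => r.isEmpty) = false := by
      cases hx : rows.any (fun r => r.isEmpty) with
      | false => rfl
      | true => exact absurd hx (by simpa using hany)
    have hpos := pvMinLen_pos rows hne hany'
    have hsucc : pvMinLen rows = (pvMinLen (rows.map List.tail)) + 1 := by
      rw [pvMinLen_tails]; omega
    rw [pvZip_eq (rows.map List.tail), hsucc, List.range_succ_eq_map]
    simp only [List.map_cons, List.map_map, List.cons.injEq]
    constructor
    · -- head column
      simp only [pvColFn]
      apply List.map_congr_left
      intro r _; cases r <;> simp
    · -- tail columns
      apply List.map_congr_left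
      intro j _
      simp only [Function.comp, pvColFn, List.map_map]
      apply List.map_congr_left
      intro r _; cases r <;> simp
termination_by (rows.map List.length).sum
decreasing_by
  simpa using pvZip_dec rows (fun he => (not_or.mp h).1 he)
    (by cases hx : rows.any (fun r => r.isEmpty) <;> simp_all)

-- ---- the dead-index lists coincide ----

theorem pvZipIdx_range' (n k : Nat) :
    (List.range' k n).zipIdx k = (List.range' k n).map (fun j => (j, j)) := by
  induction n generalizing k with
  | zero => rfl
  | succ m ih => simp [List.range'_succ, List.zipIdx_cons, ih]

theorem pvZipIdx_map {α β : Type} (f : α → β) (l : List α) (k : Nat) :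
    (l.map f).zipIdx k = (l.zipIdx k).map (fun p => (f p.1, p.2)) := by
  induction l generalizing k with
  | nil => rfl
  | cons x xs ih => simp [List.zipIdx_cons, ih]

theorem pvDead_eq (rows : List (List (Option String))) :
    pvDeadOf (pvZip rows) 0
      = (List.range (pvMinLen rows)).filter
          (fun j => rows.all (fun r => pvCellEmptyB (r.getD j none))) := by
  rw [pvDeadOf, pvZip_eq, pvZipIdx_map]
  have h1 : (List.range (pvMinLen rows)).zipIdx 0
      = (List.range (pvMinLen rows)).map (fun j => (j, j)) := by
    rw [List.range_eq_range']
    exact pvZipIdx_range' (pvMinLen rows) 0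
  rw [h1, List.map_map, List.filter_map, List.map_map]
  rw [List.filter_congr (l := List.range (pvMinLen rows))
    (q := fun j => rows.all (fun r => pvCellEmptyB (r.getD j none)))
    (by
      intro j _
      simp only [Function.comp, pvColFn, List.all_map, pvCellEmpty_eq]
      rfl)]
  exact (List.map_congr_left (fun j _ => rfl)).trans (List.map_id _)

-- ===== VERDICT (by name: the statement is the Claim_ definition above) =====
theorem clean_table_values_spec : Claim_equal_clean_table_values := by
  intro table _
  unfold Spec_clean_table_values clean_table_values clean_table_values_alt
  dsimp only
  rw [pvRemoveRowsA_eq]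
  have hfe : (fun r : List (Option String) => !(pvRowEmptyA r))
      = (fun row : List (Option String) => !(row.all pvCellEmptyB)) := rfl
  rw [hfe]
  set rows := table.filter (fun row => !(row.all pvCellEmptyB)) with hrows
  by_cases hne : rows = []
  · rw [if_pos hne, hne]
    simp [pvZip]
  · rw [if_neg hne, pvColFold]
    simp only
    rw [pvDead_eq]
    apply List.map_congr_left
    intro row _
    rw [pvCore _ 0 row (by intro x _; omega) ((List.pairwise_lt_range).filter _)]
    exact (pvKeepRow_eq_from _ row 0).symm
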